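-- pv_equiv track=rewrite | github.com/danishshaikh06/leetcode | kadane/subarraysumeqalsk.py | len_array
-- ===== SOURCE A (Python) =====
-- from typing import List
--
-- def len_array(nums: List[int], k: int):
--     Sum = 0
--     count = 0
--     for i in nums:
--         Sum = Sum + i
--         if (Sum == k or Sum - k == 0 ):
--             count +=1
--         elif (Sum - k == k):
--             count+=1
--
--     return count
-- ===== SOURCE B (Python) =====
-- from typing import List
-- from itertools import accumulate
-- from bisect import bisect_left, bisect_right
--
-- def len_array(nums: List[int], k: int):
--     # Sort the prefix sums once, then locate each target's run of equal
--     # values by binary search; the set {k, 2*k} collapses when k == 0.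
--     ps = sorted(accumulate(nums))
--     total = 0
--     for t in sorted({k, 2 * k}):
--         total += bisect_right(ps, t) - bisect_left(ps, t)
--     return total
-- ===== Notes on version B (the rewrite author's own statement) =====
-- stated objective: alternative
-- what changed: Instead of A's single running scan with an if/elif counter, B sorts the list of prefix sums and counts each target k and 2k by binary search (bisect_right - bisect_left) over the sorted list, iterating the deduplicated target set; this trades A's O(n) scan for an O(n log n) sort-then-search scheme.
import Mathlib
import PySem

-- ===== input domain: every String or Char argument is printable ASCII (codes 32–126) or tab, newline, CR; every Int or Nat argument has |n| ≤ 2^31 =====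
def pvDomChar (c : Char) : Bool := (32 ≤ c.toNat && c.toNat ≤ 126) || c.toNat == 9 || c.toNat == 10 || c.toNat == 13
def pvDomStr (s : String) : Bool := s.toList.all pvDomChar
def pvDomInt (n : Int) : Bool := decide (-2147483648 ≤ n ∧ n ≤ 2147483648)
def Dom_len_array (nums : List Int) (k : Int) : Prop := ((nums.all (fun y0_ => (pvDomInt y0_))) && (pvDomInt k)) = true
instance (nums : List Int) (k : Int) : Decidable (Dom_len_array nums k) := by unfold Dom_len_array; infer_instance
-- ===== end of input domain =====

-- B sorts the prefix sums once and counts each target k, 2k by binary search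
-- (bisect_right - bisect_left) over the sorted list: a sort-then-search alternative
-- to A's single running if/elif scan (same result, different algorithm).

-- ===== PORT A =====
-- running scan: state (Sum, count), if/elif in source order
def len_array (nums : List Int) (k : Int) : Int :=
  (nums.foldl (fun (st : Int × Int) i =>
    let Sum := st.1 + i
    if Sum = k ∨ Sum - k = 0 then (Sum, st.2 + 1)
    else if Sum - k = k then (Sum, st.2 + 1)
    else (Sum, st.2)) (0, 0)).2

-- ===== PORT B =====
-- itertools.accumulate(nums): running sums
def pyAccumulate (nums : List Int) : List Int :=
  (nums.foldl (fun (st : Int × List Int) i => (st.1 + i, st.2 ++ [st.1 + i])) (0, [])).2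

def len_array_alt (nums : List Int) (k : Int) : Int :=
  let ps := PySem.List.sorted (pyAccumulate nums) (fun x => x)
  let targets := PySem.List.sorted (PySem.Set.ofList [k, 2 * k]) (fun x => x)
  targets.foldl (fun acc t =>
    acc + ((PySem.List.bisectRight ps t : Int) - (PySem.List.bisectLeft ps t : Int))) 0

-- ===== PRECONDITION & SPEC =====
def Spec_len_array (nums : List Int) (k : Int) (out : Int) : Prop := out = len_array_alt nums k
instance (nums : List Int) (k : Int) (out : Int) : Decidable (Spec_len_array nums k out) := by unfold Spec_len_array; infer_instance

-- ===== CLAIM (what is proved, stated in full; the proofs are below) =====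
def Claim_equal_len_array : Prop := ∀ (nums : List Int) (k : Int), Dom_len_array nums k → Spec_len_array nums k (len_array nums k)

-- ===== LEMMAS AND PROOFS =====

-- prefix sums starting from s, as a simple recursion
def psFrom (s : Int) : List Int → List Int
  | [] => []
  | i :: t => (s + i) :: psFrom (s + i) t

theorem pyAccumulate_loop (nums : List Int) (s : Int) (acc : List Int) :
    (nums.foldl (fun (st : Int × List Int) i => (st.1 + i, st.2 ++ [st.1 + i])) (s, acc)).2
      = acc ++ psFrom s nums := by
  induction nums generalizing s acc with
  | nil => simp [psFrom]
  | cons i t ih => simp [List.foldl, psFrom, ih, List.append_assoc]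

theorem pyAccumulate_eq (nums : List Int) : pyAccumulate nums = psFrom 0 nums := by
  simpa using pyAccumulate_loop nums 0 []

-- A's loop counts prefix sums equal to k or 2k
theorem len_array_loop (nums : List Int) (k s c : Int) :
    (nums.foldl (fun (st : Int × Int) i =>
      let Sum := st.1 + i
      if Sum = k ∨ Sum - k = 0 then (Sum, st.2 + 1)
      else if Sum - k = k then (Sum, st.2 + 1)
      else (Sum, st.2)) (s, c)).2
      = c + ((psFrom s nums).countP (fun p => decide (p = k ∨ p = 2 * k)) : Int) := by
  induction nums generalizing s c with
  | nil => simp [psFrom]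
  | cons i t ih =>
    simp only [List.foldl_cons, psFrom, List.countP_cons]
    by_cases h1 : s + i = k ∨ s + i - k = 0
    · rw [if_pos h1, ih]
      have hd : (decide (s + i = k ∨ s + i = 2 * k)) = true := by
        simp only [decide_eq_true_eq]; omega
      rw [hd]; push_cast; simp; ring
    · by_cases h2 : s + i - k = k
      · rw [if_neg h1, if_pos h2, ih]
        have hd : (decide (s + i = k ∨ s + i = 2 * k)) = true := by
          simp only [decide_eq_true_eq]; omega
        rw [hd]; push_cast; simp; ring
      · rw [if_neg h1, if_neg h2, ih]
        have hd : (decide (s + i = k ∨ s + i = 2 * k)) = false := by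
          simp only [decide_eq_false_iff_not]; omega
        rw [hd]; push_cast; simp

-- countP of a predicate that holds exactly on the first c positions is c
theorem boundary_countP (xs : List Int) (p : Int → Bool) (c : Nat)
    (hc : c ≤ xs.length)
    (h : ∀ j (hj : j < xs.length), p xs[j] = true ↔ j < c) :
    xs.countP p = c := by
  induction xs generalizing c with
  | nil => simp only [List.length_nil, Nat.le_zero] at hc; simp [hc]
  | cons a l ih =>
    have h0 : p a = true ↔ 0 < c := by simpa using h 0 (by simp)
    have hstep : ∀ j (hj : j < l.length), p l[j] = true ↔ j + 1 < c := by
      intro j hj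
      simpa using h (j + 1) (by simpa using Nat.succ_lt_succ hj)
    cases c with
    | zero =>
      have ha : ¬ p a = true := fun hpa => absurd (h0.mp hpa) (by omega)
      have hl : l.countP p = 0 := by
        apply ih 0 (Nat.zero_le _)
        intro j hj
        rw [hstep j hj]
        omega
      simp [List.countP_cons, ha, hl]
    | succ c' =>
      have ha : p a = true := h0.mpr (Nat.succ_pos _)
      have hl : l.countP p = c' := by
        apply ih c' (by simpa using hc)
        intro j hj
        rw [hstep j hj]
        omega
      simp [List.countP_cons, ha, hl]

-- split ≤ into < and =
theorem countP_le_split (xs : List Int) (t : Int) :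
    xs.countP (fun y => decide (y ≤ t))
      = xs.countP (fun y => decide (y < t)) + xs.countP (fun y => decide (y = t)) := by
  induction xs with
  | nil => simp
  | cons a l ih =>
    simp only [List.countP_cons, ih]
    by_cases h1 : a < t
    · have : ¬ a = t := by omega
      simp [h1, this, le_of_lt h1]; omega
    · by_cases h2 : a = t
      · simp [h1, h2]; omega
      · have : ¬ a ≤ t := by omega
        simp [h1, h2, this]

-- on a sorted list, bisect_right - bisect_left counts the occurrences of t
theorem bisect_count (xs : List Int) (t : Int)
    (hs : List.Pairwise (fun a b => a ≤ b) xs) :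
    (PySem.List.bisectRight xs t : Int) - (PySem.List.bisectLeft xs t : Int)
      = (xs.countP (fun y => decide (y = t)) : Int) := by
  obtain ⟨hL1, hL2, hL3⟩ := PySem.List.bisectLeft_spec xs t hs
  obtain ⟨hR1, hR2, hR3⟩ := PySem.List.bisectRight_spec xs t hs
  have hbl : xs.countP (fun y => decide (y < t)) = PySem.List.bisectLeft xs t := by
    apply boundary_countP xs _ _ hL1
    intro j hj
    simp only [decide_eq_true_eq]
    constructor
    · intro hlt
      by_contra hge
      exact absurd (hL3 j hj (by omega)) (by omega)
    · exact hL2 j hj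
  have hbr : xs.countP (fun y => decide (y ≤ t)) = PySem.List.bisectRight xs t := by
    apply boundary_countP xs _ _ hR1
    intro j hj
    simp only [decide_eq_true_eq]
    constructor
    · intro hle
      by_contra hge
      exact absurd (hR3 j hj (by omega)) (by omega)
    · exact hR2 j hj
  rw [← hbl, ← hbr, countP_le_split xs t]
  push_cast; ring

-- split the or-predicate when the two targets differ
theorem countP_or_split (xs : List Int) (k : Int) (hk : k ≠ 0) :
    xs.countP (fun p => decide (p = k ∨ p = 2 * k))
      = xs.countP (fun y => decide (y = k)) + xs.countP (fun y => decide (y = 2 * k)) := by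
  have hne : ¬ (k = 2 * k) := by omega
  induction xs with
  | nil => simp
  | cons a l ih =>
    simp only [List.countP_cons, ih]
    by_cases h1 : a = k
    · subst h1
      simp [hne]
      omega
    · by_cases h2 : a = 2 * k
      · subst h2
        simp [show ¬ ((2 * k : Int) = k) from fun h => hne h.symm]
        omega
      · simp [h1, h2]

-- ===== VERDICT (by name: the statement is the Claim_ definition above) =====
theorem len_array_spec : Claim_equal_len_array := by
  intro nums k _
  unfold Spec_len_array len_array len_array_alt
  rw [len_array_loop nums k 0 0, pyAccumulate_eq]
  set ps := PySem.List.sorted (psFrom 0 nums) (fun x => x) with hps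
  have hsorted : List.Pairwise (fun a b => a ≤ b) ps := by
    have := PySem.List.sorted_pairwise (psFrom 0 nums) (fun x => x)
    simpa using this
  have hperm : ps.Perm (psFrom 0 nums) := PySem.List.sorted_perm _ _ _
  have hcnt : ∀ t : Int,
      (PySem.List.bisectRight ps t : Int) - (PySem.List.bisectLeft ps t : Int)
        = ((psFrom 0 nums).countP (fun y => decide (y = t)) : Int) := by
    intro t
    rw [bisect_count ps t hsorted, hperm.countP_eq]
  by_cases hk : k = 0
  · subst hk
    have hset : PySem.List.sorted (PySem.Set.ofList [(0:Int), 2 * 0]) (fun x => x) = [0] := by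
      decide
    rw [hset]
    simp only [List.foldl_cons, List.foldl_nil]
    rw [hcnt 0]
    have : ((psFrom 0 nums).countP (fun p => decide (p = (0:Int) ∨ p = 2 * 0)))
        = ((psFrom 0 nums).countP (fun y => decide (y = (0:Int)))) := by
      apply List.countP_congr
      intro a _
      simp
    rw [this]
  · have hne : k ≠ 2 * k := by omega
    have hofl : PySem.Set.ofList [k, 2 * k] = [k, 2 * k] := by
      apply PySem.Set.ofList_eq_self_of_nodup
      simp [hne]
    rw [hofl]
    rw [countP_or_split (psFrom 0 nums) k hk]
    by_cases hpos : 0 < k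
    · have hsrt : PySem.List.sorted [k, 2 * k] (fun x => x) = [k, 2 * k] := by
        apply PySem.List.sorted_eq_of_perm_of_pairwise_lt
        · exact List.Perm.refl _
        · simp; omega
      rw [hsrt]
      simp only [List.foldl_cons, List.foldl_nil]
      rw [hcnt k, hcnt (2 * k)]
      push_cast; ring
    · have hsrt : PySem.List.sorted [k, 2 * k] (fun x => x) = [2 * k, k] := by
        apply PySem.List.sorted_eq_of_perm_of_pairwise_lt
        · exact List.Perm.swap _ _ _
        · simp; omega
      rw [hsrt]
      simp only [List.foldl_cons, List.foldl_nil]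
      rw [hcnt k, hcnt (2 * k)]
      push_cast; ring
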